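-- pv_equiv track=rewrite | github.com/CodingTestStudy2/Daily_Morning_Coding_Test | 프로그래머스/lv3/김서영/76503.py | solution
-- ===== SOURCE A (Python) =====
-- def solution(a, edges):
--     if sum(a) != 0: return -1
--
--     graph = [[] for _ in range(len(a))]
--     for s1, s2 in edges:
--         graph[s1].append(s2)
--         graph[s2].append(s1)
--
--     def dfs(node):
--         visited[node] = True
--         total_moves = 0
--
--         for neighbor in graph[node]:
--             if not visited[neighbor]:
--                 total_moves += dfs(neighbor)
--         total_moves += abs(a[node])
--         if node != 0: a[graph[node][0]] += a[node]
--         a[node] = 0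
--         return total_moves
--
--     visited = [False] * len(a)
--     return dfs(0)
-- ===== SOURCE B (Python) =====
-- def solution(a, edges):
--     if sum(a) != 0: return -1
--
--     graph = [[] for _ in range(len(a))]
--     for s1, s2 in edges:
--         graph[s1].append(s2)
--         graph[s2].append(s1)
--
--     # iterative DFS computing the post-order, then one flat pass doing the arithmetic
--     visited = [False] * len(a)
--     visited[0] = True
--     order = []
--     stack = [(0, 0)]
--     while stack:
--         node, i = stack[-1]
--         if i < len(graph[node]):
--             stack[-1] = (node, i + 1)
--             nb = graph[node][i]
--             if not visited[nb]:
--                 visited[nb] = True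
--                 stack.append((nb, 0))
--         else:
--             stack.pop()
--             order.append(node)
--
--     total = 0
--     for node in order:
--         total += abs(a[node])
--         if node != 0:
--             a[graph[node][0]] += a[node]
--         a[node] = 0
--     return total
-- ===== Notes on version B (the rewrite author's own statement) =====
-- stated objective: alternative
-- what changed: A's recursive DFS that mutates a and accumulates the total during the recursion is replaced by an explicit-stack iterative DFS that first records the post-order, followed by one flat loop over that order performing the identical per-node mutations and accumulation.
-- outside the precondition, e.g. on solution([0], [[0, 1], [1, 0]]): A raises IndexError, B raises IndexError; on solution([], []): A raises IndexError, B raises IndexError; on solution([0, 0], [[0, 1, 1]]): A raises ValueError, B raises ValueError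
import Mathlib
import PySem

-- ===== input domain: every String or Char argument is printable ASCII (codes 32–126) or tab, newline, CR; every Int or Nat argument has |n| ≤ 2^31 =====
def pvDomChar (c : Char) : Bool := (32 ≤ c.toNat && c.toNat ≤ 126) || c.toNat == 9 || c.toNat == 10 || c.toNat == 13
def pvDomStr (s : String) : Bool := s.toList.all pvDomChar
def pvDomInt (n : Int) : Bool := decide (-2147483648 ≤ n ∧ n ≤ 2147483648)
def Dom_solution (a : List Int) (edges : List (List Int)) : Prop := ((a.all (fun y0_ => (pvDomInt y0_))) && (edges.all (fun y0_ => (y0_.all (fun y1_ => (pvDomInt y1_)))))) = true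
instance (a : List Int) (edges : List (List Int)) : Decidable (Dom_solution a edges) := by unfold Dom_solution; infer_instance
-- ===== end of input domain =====

-- B replaces A's recursive DFS by an explicit-stack iterative DFS that first records the
-- post-order and then performs A's per-node arithmetic in ONE flat pass over that order
-- (objective: alternative decomposition, same asymptotic cost; both mutate `a` identically).

-- shared index helpers (Python indexing with negative wraparound; the defaults are only
-- reached where Python would raise IndexError, which Pre_solution excludes)
def gGet (g : List (List Int)) (i : Int) : List Int := PySem.List.pyGetD g i []
def vGet (v : List Bool) (i : Int) : Bool := PySem.List.pyGetD v i true
def vMark (v : List Bool) (i : Int) : List Bool := PySem.List.pySetD v i true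
def aGet (ar : List Int) (i : Int) : Int := PySem.List.pyGetD ar i 0
def aSet (ar : List Int) (i : Int) (x : Int) : List Int := PySem.List.pySetD ar i x

-- adjacency build, identical lines in A and B: `graph[s1].append(s2); graph[s2].append(s1)`;
-- `s1, s2 = edge` is exact when the edge has length 2 (else Python raises ValueError — excluded by Pre_)
def addNb (g : List (List Int)) (s t : Int) : List (List Int) :=
  PySem.List.pySetD g s (gGet g s ++ [t])
def buildGraph (n : Nat) (edges : List (List Int)) : List (List Int) :=
  edges.foldl (fun g e =>
    addNb (addNb g (PySem.List.pyGetD e 0 0) (PySem.List.pyGetD e 1 0))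
      (PySem.List.pyGetD e 1 0) (PySem.List.pyGetD e 0 0)) (List.replicate n [])

-- ===== PORT A =====
-- `dfs(node)` with the mutable state (a, visited) threaded explicitly; the fuel is a
-- recursion-depth bound (each call marks a fresh visited cell, so the depth is ≤ len(a) < fuel
-- on every input Pre_solution admits; Python's recursion is unbounded)
def dfsA (g : List (List Int)) : Nat → Int → List Int × List Bool → List Int × List Bool × Int
  | 0, _, s => (s.1, s.2, 0)
  | fuel+1, node, s =>
    let v := vMark s.2 node
    let r := (gGet g node).foldl
      (fun (t : List Int × List Bool × Int) nb =>
        if vGet t.2.1 nb then t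
        else
          let q := dfsA g fuel nb (t.1, t.2.1)
          (q.1, q.2.1, t.2.2 + q.2.2)) (s.1, v, 0)
    let tm := r.2.2 + |aGet r.1 node|
    let ar := if node ≠ 0 then aSet r.1 (aGet (gGet g node) 0) (aGet r.1 (aGet (gGet g node) 0) + aGet r.1 node) else r.1
    (aSet ar node 0, r.2.1, tm)

def solution (a : List Int) (edges : List (List Int)) : Int :=
  if a.sum ≠ 0 then -1
  else
    let g := buildGraph a.length edges
    (dfsA g (a.length + 1) 0 (a, List.replicate a.length false)).2.2

-- ===== PORT B =====
-- termination bookkeeping for B's while loop (each iteration strictly decreases mSize;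
-- these lemmas are cited by runM's decreasing_by)
def degSum (g : List (List Int)) : Nat := (g.map List.length).sum
def mSize (g : List (List Int)) (st : List (Int × Nat)) (v : List Bool) : Nat :=
  v.count false * (degSum g + 2)
  + (st.map (fun p => ((gGet g p.1).length + 1) - p.2)).sum + st.length

theorem pyIdx?_some_lt {n : Nat} {i : Int} {k : Nat} (h : PySem.List.pyIdx? n i = some k) : k < n := by
  simp only [PySem.List.pyIdx?] at h
  split_ifs at h <;> simp_all <;> omega

theorem gGet_len_le (g : List (List Int)) (i : Int) : (gGet g i).length ≤ degSum g := by
  unfold gGet PySem.List.pyGetD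
  cases hg : PySem.List.pyGet? g i with
  | none => simp [degSum]
  | some l =>
    have hm := PySem.List.mem_of_pyGet?_eq_some g hg
    have : l.length ∈ g.map List.length := List.mem_map_of_mem hm
    simpa [degSum] using List.le_sum_of_mem this

theorem count_vMark_of_false {v : List Bool} {i : Int} (h : vGet v i = false) :
    (vMark v i).count false + 1 = v.count false := by
  unfold vGet PySem.List.pyGetD at h
  cases hg : PySem.List.pyGet? v i with
  | none => simp [hg] at h
  | some b =>
    rw [hg] at h
    simp at h
    subst h
    simp only [PySem.List.pyGet?] at hg
    cases hk : PySem.List.pyIdx? v.length i with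
    | none => simp [hk] at hg
    | some k =>
      rw [hk] at hg
      simp at hg
      have hlt : k < v.length := pyIdx?_some_lt hk
      have hset : vMark v i = v.set k true := by
        unfold vMark PySem.List.pySetD PySem.List.pySet?
        simp [hk]
      rw [hset, List.count_set hlt]
      have hvk : v[k] = false := by
        have := List.getElem?_eq_getElem hlt
        rw [this] at hg; simpa using hg
      simp [hvk]
      have : 1 ≤ v.count false := by
        have : false ∈ v := by
          rw [← hvk]; exact List.getElem_mem hlt
        simpa [List.count_pos_iff] using this
      omega

theorem mSize_pop_lt (g : List (List Int)) (node : Int) (i : Nat) (rest : List (Int × Nat))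
    (v : List Bool) : mSize g rest v < mSize g ((node, i) :: rest) v := by
  simp [mSize]
  omega

theorem mSize_inc_lt (g : List (List Int)) (node : Int) (i : Nat) (rest : List (Int × Nat))
    (v v' : List Bool) (hi : i < (gGet g node).length) (hv : v'.count false ≤ v.count false) :
    mSize g ((node, i+1) :: rest) v' < mSize g ((node, i) :: rest) v := by
  simp only [mSize, List.map_cons, List.sum_cons, List.length_cons]
  have := Nat.mul_le_mul_right (degSum g + 2) hv
  omega

theorem mSize_push_lt (g : List (List Int)) (node nb : Int) (i : Nat) (rest : List (Int × Nat))
    (v v' : List Bool) (hi : i < (gGet g node).length) (hv : v'.count false + 1 ≤ v.count false) :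
    mSize g ((nb, 0) :: (node, i+1) :: rest) v' < mSize g ((node, i) :: rest) v := by
  simp only [mSize, List.map_cons, List.sum_cons, List.length_cons]
  have h1 : (gGet g nb).length ≤ degSum g := gGet_len_le g nb
  have h2 : (v'.count false + 1) * (degSum g + 2) ≤ v.count false * (degSum g + 2) :=
    Nat.mul_le_mul_right _ hv
  rw [Nat.add_mul, Nat.one_mul] at h2
  omega

-- the while loop of B: stack of (node, next-neighbour-index) frames; pops append to the post-order
def runM (g : List (List Int)) : List (Int × Nat) → List Bool → List Int → List Bool × List Int
  | [], v, out => (v, out)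
  | (node, i) :: rest, v, out =>
    if h : i < (gGet g node).length then
      let nb := (gGet g node)[i]
      if hv : vGet v nb then runM g ((node, i+1) :: rest) v out
      else runM g ((nb, 0) :: (node, i+1) :: rest) (vMark v nb) out
    else runM g rest v (out ++ [node])
  termination_by st v _ => mSize g st v
  decreasing_by
  · exact mSize_inc_lt g node i rest v v h le_rfl
  · exact mSize_push_lt g node ((gGet g node)[i]) i rest v _ h
      (Nat.le_of_eq (count_vMark_of_false (by simpa using hv)))
  · exact mSize_pop_lt g node i rest v

-- the body of B's flat arithmetic pass over the post-order
def passStep (g : List (List Int)) (s : List Int × Int) (node : Int) : List Int × Int :=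
  let t := s.2 + |aGet s.1 node|
  let ar := if node ≠ 0 then aSet s.1 (aGet (gGet g node) 0) (aGet s.1 (aGet (gGet g node) 0) + aGet s.1 node) else s.1
  (aSet ar node 0, t)

def solution_alt (a : List Int) (edges : List (List Int)) : Int :=
  if a.sum ≠ 0 then -1
  else
    let g := buildGraph a.length edges
    let v := vMark (List.replicate a.length false) 0
    let r := runM g [(0, 0)] v []
    (r.2.foldl (passStep g) (a, 0)).2

-- ===== PRECONDITION & SPEC =====
-- Pre_ excludes exactly the inputs where A raises: when sum(a) == 0 the DFS runs, so a must be
-- non-empty (else visited[0] is an IndexError) and every edge must be a length-2 pair of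
-- in-range (Python-wraparound allowed) node indices (else ValueError/IndexError while building the graph).
def Pre_solution (a : List Int) (edges : List (List Int)) : Prop :=
  a.sum ≠ 0 ∨ (a ≠ [] ∧ ∀ e ∈ edges, e.length = 2 ∧ ∀ x ∈ e, -(a.length : Int) ≤ x ∧ x < (a.length : Int))
instance (a : List Int) (edges : List (List Int)) : Decidable (Pre_solution a edges) := by
  unfold Pre_solution; infer_instance

def pvWitness_solution : List Int × List (List Int) := ([3, -3, 0], [[0, 1], [1, 2]])

def Spec_solution (a : List Int) (edges : List (List Int)) (out : Int) : Prop := out = solution_alt a edges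
instance (a : List Int) (edges : List (List Int)) (out : Int) : Decidable (Spec_solution a edges out) := by unfold Spec_solution; infer_instance

-- ===== CLAIM (what is proved, stated in full; the proofs are below) =====
def Claim_equal_solution : Prop := ∀ (a : List Int) (edges : List (List Int)), Dom_solution a edges → Pre_solution a edges → Spec_solution a edges (solution a edges)

-- ===== LEMMAS AND PROOFS =====

theorem count_vMark_le (v : List Bool) (i : Int) :
    (vMark v i).count false ≤ v.count false := by
  unfold vMark PySem.List.pySetD PySem.List.pySet?
  cases hk : PySem.List.pyIdx? v.length i with
  | none => simp
  | some k =>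
    have hlt : k < v.length := pyIdx?_some_lt hk
    simp only [Option.map_some, Option.getD_some]
    rw [List.count_set hlt]
    cases h : v[k] <;> simp

-- recursive reference: the post-order and visited set produced by a DFS from `node`
def procL (rec : Int → List Bool → List Int × List Bool) (nbs : List Int)
    (s : List Int × List Bool) : List Int × List Bool :=
  nbs.foldl (fun s nb => if vGet s.2 nb then s else
    let q := rec nb s.2
    (s.1 ++ q.1, q.2)) s

def postRec (g : List (List Int)) : Nat → Int → List Bool → List Int × List Bool
  | 0, _, v => ([], v)
  | f+1, node, v =>
    let s := procL (postRec g f) (gGet g node) ([], vMark v node)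
    (s.1 ++ [node], s.2)

def passP (g : List (List Int)) (ord : List Int) (a : List Int) : List Int × Int :=
  ord.foldl (passStep g) (a, 0)

theorem procL_acc (rec : Int → List Bool → List Int × List Bool) (nbs : List Int)
    (o : List Int) (v : List Bool) :
    procL rec nbs (o, v) = (o ++ (procL rec nbs ([], v)).1, (procL rec nbs ([], v)).2) := by
  induction nbs generalizing o v with
  | nil => simp [procL]
  | cons nb tl ih =>
    simp only [procL, List.foldl_cons] at ih ⊢
    by_cases h : vGet v nb
    · simp only [h, if_pos]
      exact ih o v
    · simp only [h, if_neg, Bool.false_eq_true, not_false_iff]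
      rw [ih (o ++ (rec nb v).1) (rec nb v).2, ih ([] ++ (rec nb v).1) (rec nb v).2]
      simp

theorem procL_count_of (rec : Int → List Bool → List Int × List Bool)
    (hrec : ∀ node v, ((rec node v).2.count false) ≤ v.count false)
    (nbs : List Int) : ∀ s : List Int × List Bool,
    ((procL rec nbs s).2.count false) ≤ s.2.count false := by
  induction nbs with
  | nil => intro s; simp [procL]
  | cons nb tl ih =>
    intro s
    simp only [procL, List.foldl_cons]
    by_cases h : vGet s.2 nb
    · simp only [h, if_pos]; exact ih s
    · simp only [h, if_neg, Bool.false_eq_true, not_false_iff]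
      exact le_trans (ih _) (hrec nb s.2)

theorem postRec_count (g : List (List Int)) :
    ∀ f node v, ((postRec g f node v).2.count false) ≤ v.count false := by
  intro f
  induction f with
  | zero => intro node v; simp [postRec]
  | succ f ih =>
    intro node v
    simp only [postRec]
    exact le_trans (procL_count_of _ ih (gGet g node) _) (count_vMark_le v node)

theorem procL_count (g : List (List Int)) (f : Nat) (nbs : List Int) (o : List Int) (v : List Bool) :
    ((procL (postRec g f) nbs (o, v)).2.count false) ≤ v.count false :=
  procL_count_of _ (postRec_count g f) nbs (o, v)

theorem pass_affine (g : List (List Int)) (ord : List Int) :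
    ∀ a t, ord.foldl (passStep g) (a, t) = ((passP g ord a).1, t + (passP g ord a).2) := by
  induction ord with
  | nil => intro a t; simp [passP]
  | cons x tl ih =>
    intro a t
    simp only [passP, List.foldl_cons]
    have h1 : passStep g (a, t) x = ((passStep g (a, 0) x).1, t + (passStep g (a, 0) x).2) := by
      simp [passStep]
    rw [h1, ih, ih (passStep g (a, 0) x).1 (passStep g (a, 0) x).2]
    simp [Prod.ext_iff]
    ring

theorem pass_append (g : List (List Int)) (o1 o2 : List Int) (a : List Int) :
    passP g (o1 ++ o2) a = ((passP g o2 (passP g o1 a).1).1,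
      (passP g o1 a).2 + (passP g o2 (passP g o1 a).1).2) := by
  simp only [passP, List.foldl_append]
  rw [show o1.foldl (passStep g) (a, 0) = ((passP g o1 a).1, (passP g o1 a).2) from rfl]
  exact pass_affine g o2 _ _

-- T1: A's interleaved recursion = (post-order of the reference DFS) + B's flat pass
theorem dfsA_eq_pass (g : List (List Int)) :
    ∀ f node a v,
      dfsA g f node (a, v) = ((passP g (postRec g f node v).1 a).1,
        (postRec g f node v).2, (passP g (postRec g f node v).1 a).2) := by
  intro f
  induction f with
  | zero => intro node a v; simp [dfsA, postRec, passP]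
  | succ f ihf =>
    intro node a v
    have laux : ∀ nbs (a : List Int) (v : List Bool) (t : Int),
        nbs.foldl (fun (t : List Int × List Bool × Int) nb =>
          if vGet t.2.1 nb then t
          else
            let q := dfsA g f nb (t.1, t.2.1)
            (q.1, q.2.1, t.2.2 + q.2.2)) (a, v, t) =
        ((passP g (procL (postRec g f) nbs ([], v)).1 a).1,
         (procL (postRec g f) nbs ([], v)).2,
         t + (passP g (procL (postRec g f) nbs ([], v)).1 a).2) := by
      intro nbs
      induction nbs with
      | nil => intro a v t; simp [procL, passP]
      | cons nb tl ih =>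
        intro a v t
        simp only [List.foldl_cons]
        by_cases h : vGet v nb
        · simp only [h, if_pos]
          rw [ih a v t]
          have hskip : procL (postRec g f) (nb :: tl) ([], v) = procL (postRec g f) tl ([], v) := by
            simp [procL, h]
          rw [hskip]
        · simp only [h, if_neg, Bool.false_eq_true, not_false_iff]
          rw [ihf nb a v]
          rw [ih ((passP g (postRec g f nb v).1 a).1) ((postRec g f nb v).2)
              (t + (passP g (postRec g f nb v).1 a).2)]
          have hstep : procL (postRec g f) (nb :: tl) ([], v) =
              ((postRec g f nb v).1 ++ (procL (postRec g f) tl ([], (postRec g f nb v).2)).1,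
               (procL (postRec g f) tl ([], (postRec g f nb v).2)).2) := by
            simp only [procL, List.foldl_cons, h, if_neg, Bool.false_eq_true, not_false_iff]
            have := procL_acc (postRec g f) tl ((postRec g f nb v).1) ((postRec g f nb v).2)
            simp only [procL] at this
            simpa using this
          rw [hstep]
          rw [pass_append g ((postRec g f nb v).1)
              ((procL (postRec g f) tl ([], (postRec g f nb v).2)).1) a]
          simp [Prod.ext_iff]
          ring
    show dfsA g (f+1) node (a, v) = _
    simp only [dfsA, postRec]
    rw [laux (gGet g node) a (vMark v node) 0]
    rw [pass_append g ((procL (postRec g f) (gGet g node) ([], vMark v node)).1) [node] a]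
    have hsingle : ∀ (a' : List Int), passP g [node] a' = passStep g (a', 0) node := by
      intro a'; simp [passP]
    rw [hsingle]
    simp only [passStep]
    simp

-- T2: B's stack machine computes exactly the reference DFS post-order and visited set
theorem runM_sim (g : List (List Int)) :
    ∀ N node i rest v out, mSize g ((node, i) :: rest) v ≤ N →
      ∀ f, v.count false < f →
      runM g ((node, i) :: rest) v out =
        runM g rest (procL (postRec g f) ((gGet g node).drop i) ([], v)).2
          (out ++ (procL (postRec g f) ((gGet g node).drop i) ([], v)).1 ++ [node]) := by
  intro N
  induction N with
  | zero =>
    intro node i rest v out hm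
    exfalso
    simp [mSize] at hm
  | succ N ih =>
    intro node i rest v out hm f hf
    rw [runM]
    by_cases h : i < (gGet g node).length
    · rw [dif_pos h]
      simp only []
      have hdrop : (gGet g node).drop i = (gGet g node)[i] :: (gGet g node).drop (i+1) :=
        List.drop_eq_getElem_cons h
      by_cases hv : vGet v ((gGet g node)[i])
      · rw [dif_pos hv]
        rw [ih node (i+1) rest v out
          (by have := mSize_inc_lt g node i rest v v h le_rfl; omega) f hf]
        rw [hdrop]
        have : procL (postRec g f) ((gGet g node)[i] :: (gGet g node).drop (i+1)) ([], v) =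
            procL (postRec g f) ((gGet g node).drop (i+1)) ([], v) := by
          simp only [procL, List.foldl_cons, hv, if_true]
        rw [this]
      · rw [dif_neg (by simp [hv])]
        have hc := count_vMark_of_false (v := v) (i := (gGet g node)[i]) (by simpa using hv)
        obtain ⟨f', rfl⟩ : ∃ f', f = f' + 1 := ⟨f - 1, by omega⟩
        set nb := (gGet g node)[i] with hnb
        -- child frame
        rw [ih nb 0 ((node, i+1) :: rest) (vMark v nb) out
          (by have := mSize_push_lt g node nb i rest v (vMark v nb) h (by omega); omega)
          f' (by omega)]
        simp only [List.drop_zero]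
        set S1 := procL (postRec g f') (gGet g nb) ([], vMark v nb) with hS1
        -- continue the current frame
        have hcnt : S1.2.count false ≤ v.count false :=
          le_trans (procL_count g f' (gGet g nb) [] (vMark v nb)) (count_vMark_le v nb)
        rw [ih node (i+1) rest S1.2 (out ++ S1.1 ++ [nb])
          (by have := mSize_inc_lt g node i rest v S1.2 h hcnt; omega)
          (f' + 1) (by omega)]
        set S2 := procL (postRec g (f' + 1)) ((gGet g node).drop (i+1)) ([], S1.2) with hS2
        -- fold the right-hand side
        rw [hdrop]
        have hrhs : procL (postRec g (f' + 1)) (nb :: (gGet g node).drop (i+1)) ([], v) =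
            ((S1.1 ++ [nb]) ++ S2.1, S2.2) := by
          simp only [procL, List.foldl_cons, hv, if_neg, Bool.false_eq_true, not_false_iff]
          have hpost : postRec g (f' + 1) nb v = (S1.1 ++ [nb], S1.2) := by
            simp [postRec, hS1]
          rw [show (List.foldl _ ([] ++ (postRec g (f'+1) nb v).1, (postRec g (f'+1) nb v).2)
              ((gGet g node).drop (i+1)) = _) from rfl]
          rw [hpost]
          have := procL_acc (postRec g (f' + 1)) ((gGet g node).drop (i+1))
            (S1.1 ++ [nb]) S1.2
          simp only [procL] at this hS2
          simp [this, ← hS2]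
        rw [hrhs]
        simp [List.append_assoc]
    · rw [dif_neg h]
      have hdrop : (gGet g node).drop i = [] := List.drop_eq_nil_of_le (by omega)
      rw [hdrop]
      simp [procL]

-- ===== VERDICT (by name: the statement is the Claim_ definition above) =====
theorem solution_spec : Claim_equal_solution := by
  unfold Claim_equal_solution Spec_solution
  intro a edges _hdom hpre
  unfold solution solution_alt
  by_cases hs : a.sum ≠ 0
  · simp [hs]
  · rw [if_neg hs, if_neg hs]
    have hane : a ≠ [] := by
      rcases hpre with h | h
      · exact absurd h hs
      · exact h.1
    have hn : 1 ≤ a.length := List.length_pos_of_ne_nil hane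
    set g := buildGraph a.length edges with hg
    set v0 := List.replicate a.length false with hv0
    have hv00 : vGet v0 0 = false := by
      unfold vGet
      rw [PySem.List.pyGetD_zero]
      cases hn' : a.length with
      | zero => omega
      | succ m => simp [hv0, hn', List.replicate_succ]
    have hcv0 : v0.count false = a.length := by
      simp [hv0]
    have hc1 : (vMark v0 0).count false + 1 = a.length := by
      rw [count_vMark_of_false hv00, hcv0]
    -- A's side: recursion = post-order + flat pass
    simp only []
    rw [dfsA_eq_pass g (a.length + 1) 0 a v0]
    -- B's side: machine = the same post-order
    rw [runM_sim g (mSize g [(0, 0)] (vMark v0 0)) 0 0 [] (vMark v0 0) [] le_rfl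
      a.length (by omega)]
    rw [runM]
    simp only [List.drop_zero, List.nil_append]
    have hpost : postRec g (a.length + 1) 0 v0 =
        ((procL (postRec g a.length) (gGet g 0) ([], vMark v0 0)).1 ++ [0],
         (procL (postRec g a.length) (gGet g 0) ([], vMark v0 0)).2) := by
      simp [postRec]
    rw [hpost]
    simp [passP]
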